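-- pv_equiv track=rewrite | github.com/zqiu24/POET | torchrun_main.py | find_closest_valid_rank
-- ===== SOURCE A (Python) =====
-- def find_closest_valid_rank(in_features, out_features, target_rank):
--     """Find the closest rank that divides both in_features and out_features evenly."""
--     # Get all factors of both in_features and out_features
--     def get_factors(n):
--         factors = []
--         for i in range(1, int(n ** 0.5) + 1):
--             if n % i == 0:
--                 factors.append(i)
--                 if i != n // i:
--                     factors.append(n // i)
--         return sorted(factors)
--
--     in_factors = get_factors(in_features)
--     out_factors = get_factors(out_features)
--
--     # Find common factors
--     common_factors = sorted(list(set(in_factors) & set(out_factors)))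
--
--     # Find closest factor to target_rank
--     closest_rank = min(common_factors, key=lambda x: abs(x - target_rank))
--     return closest_rank
-- ===== SOURCE B (Python) =====
-- def find_closest_valid_rank(in_features, out_features, target_rank):
--     """Find the closest rank that divides both in_features and out_features evenly."""
--     # Common divisors of the pair are exactly the divisors of gcd(in, out):
--     # factor the gcd once instead of factoring both numbers and intersecting.
--     if in_features <= 0 or out_features <= 0:
--         raise ValueError("feature dimensions must be positive")
--     a, b = in_features, out_features
--     while b:
--         a, b = b, a % b
--     g = a
--     divisors = []
--     i = 1
--     while i * i <= g:
--         if g % i == 0: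
--             divisors.append(i)
--             if i != g // i:
--                 divisors.append(g // i)
--         i += 1
--     divisors.sort()
--     return min(divisors, key=lambda x: abs(x - target_rank))
-- ===== Notes on version B (the rewrite author's own statement) =====
-- stated objective: faster
-- what changed: Instead of factorizing in_features and out_features separately and intersecting the two factor sets, B computes g = gcd(in_features, out_features) by the Euclidean algorithm and enumerates the divisors of g in one sqrt(g) loop (common divisors of a pair are exactly the divisors of their gcd), then takes the same min by distance to target_rank over the ascending list; non-positive feature dimensions are rejected with ValueError, matching A's raising behaviour there (outside Pre_).
import Mathlib
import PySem

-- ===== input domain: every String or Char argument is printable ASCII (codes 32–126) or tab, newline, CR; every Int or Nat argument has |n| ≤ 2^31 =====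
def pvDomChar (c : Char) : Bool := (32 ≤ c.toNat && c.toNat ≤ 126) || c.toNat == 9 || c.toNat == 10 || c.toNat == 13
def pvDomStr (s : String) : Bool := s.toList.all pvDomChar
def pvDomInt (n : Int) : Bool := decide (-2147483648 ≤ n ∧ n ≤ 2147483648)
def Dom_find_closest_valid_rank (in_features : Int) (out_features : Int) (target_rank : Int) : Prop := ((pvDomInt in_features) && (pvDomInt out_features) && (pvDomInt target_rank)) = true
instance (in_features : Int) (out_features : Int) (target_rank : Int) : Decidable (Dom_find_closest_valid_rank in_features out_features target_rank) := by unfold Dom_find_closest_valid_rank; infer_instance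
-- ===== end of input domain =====

-- B computes gcd(in_features, out_features) with the Euclidean algorithm and factors only the gcd
-- (common divisors of a pair are exactly the divisors of their gcd), instead of A's two separate
-- factorizations plus a set intersection; the closest-to-target minimum is taken over the same
-- ascending list, so ties break identically; non-positive dimensions raise (outside Pre_) in both.


-- ===== PORT A =====
-- int(n ** 0.5): exact floor square root for every 0 ≤ n ≤ 2^31 (the Dom bound; double-precision
-- sqrt never misrounds across an integer there); for n < 0 Python raises TypeError (outside Pre_).
def pvSqrtI (n : Int) : Int := (Nat.sqrt n.toNat : Int)

-- helper get_factors of A, transliterated (loop over range(1, int(n**0.5)+1), two appends, then sorted)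
def pvGetFactors (n : Int) : List Int :=
  let factors := (PySem.List.pyRange 1 (pvSqrtI n + 1) 1).foldl
    (fun factors i =>
      if PySem.Int.mod n i = 0 then
        let factors := factors ++ [i]
        if i ≠ PySem.Int.floordiv n i then factors ++ [PySem.Int.floordiv n i] else factors
      else factors) []
  PySem.List.sorted factors (fun x => x) false

def find_closest_valid_rank (in_features : Int) (out_features : Int) (target_rank : Int) : Int :=
  let in_factors := pvGetFactors in_features
  let out_factors := pvGetFactors out_features
  let common_factors := PySem.List.sorted
    (PySem.Set.inter (PySem.Set.ofList in_factors) (PySem.Set.ofList out_factors)) (fun x => x) false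
  -- min(...) raises ValueError on the empty list: none-branch is unreachable under Pre_, returns 0
  match PySem.List.min? common_factors (fun x => |x - target_rank|) with
  | some m => m
  | none => 0

-- ===== PORT B =====
-- while b: a, b = b, a % b
def pvGcdLoop (a : Int) (b : Int) : Int :=
  if b = 0 then a else pvGcdLoop b (PySem.Int.mod a b)
termination_by b.natAbs
decreasing_by
  rename_i h
  rcases lt_trichotomy b 0 with hb | hb | hb
  · have h1 := PySem.Int.mod_neg_bounds a hb
    omega
  · exact absurd hb h
  · have h1 := PySem.Int.mod_nonneg a hb
    have h2 := PySem.Int.mod_lt a hb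
    omega

-- i*i ≤ g → i ≤ g (cited by pvDivLoop's decreasing_by)
theorem pvLeOfSqLe (i g : Int) (h : i * i ≤ g) : i ≤ g := by
  by_cases hi : i ≤ 0
  · exact hi.trans (le_trans (mul_self_nonneg i) h)
  · have hi' : 0 < i := by omega
    calc i = i * 1 := (mul_one i).symm
      _ ≤ i * i := by exact mul_le_mul_of_nonneg_left hi' hi'.le
      _ ≤ g := h

-- while i * i <= g: append i (and g // i when distinct); i += 1
def pvDivLoop (g : Int) (i : Int) (divisors : List Int) : List Int :=
  if h : i * i ≤ g then
    pvDivLoop g (i + 1)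
      (if PySem.Int.mod g i = 0 then
        let divisors := divisors ++ [i]
        if i ≠ PySem.Int.floordiv g i then divisors ++ [PySem.Int.floordiv g i] else divisors
      else divisors)
  else divisors
termination_by (g + 1 - i).toNat
decreasing_by
  have := pvLeOfSqLe i g h
  omega

def find_closest_valid_rank_alt (in_features : Int) (out_features : Int) (target_rank : Int) : Int :=
  -- 'raise ValueError' for non-positive dimensions: unreachable under Pre_, returns 0
  if in_features ≤ 0 ∨ out_features ≤ 0 then 0
  else
    let g := pvGcdLoop in_features out_features
    let divisors := pvDivLoop g 1 []
    let divisors := PySem.List.sorted divisors (fun x => x) false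
    -- min(...) raises ValueError on the empty list: none-branch is unreachable under Pre_, returns 0
    match PySem.List.min? divisors (fun x => |x - target_rank|) with
    | some m => m
    | none => 0

-- ===== PRECONDITION & SPEC =====
-- A returns normally exactly when both features are positive: for a negative feature int(n**0.5)
-- raises TypeError, and when a feature is 0 its factor list is empty, so min(...) raises ValueError.
def Pre_find_closest_valid_rank (in_features : Int) (out_features : Int) (target_rank : Int) : Prop :=
  1 ≤ in_features ∧ 1 ≤ out_features
instance (in_features : Int) (out_features : Int) (target_rank : Int) : Decidable (Pre_find_closest_valid_rank in_features out_features target_rank) := by unfold Pre_find_closest_valid_rank; infer_instance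

def pvWitness_find_closest_valid_rank : Int × Int × Int := (6, 4, 3)

def Spec_find_closest_valid_rank (in_features : Int) (out_features : Int) (target_rank : Int) (out : Int) : Prop := out = find_closest_valid_rank_alt in_features out_features target_rank
instance (in_features : Int) (out_features : Int) (target_rank : Int) (out : Int) : Decidable (Spec_find_closest_valid_rank in_features out_features target_rank out) := by unfold Spec_find_closest_valid_rank; infer_instance

-- ===== CLAIM (what is proved, stated in full; the proofs are below) =====
def Claim_equal_find_closest_valid_rank : Prop := ∀ (in_features : Int) (out_features : Int) (target_rank : Int), Dom_find_closest_valid_rank in_features out_features target_rank → Pre_find_closest_valid_rank in_features out_features target_rank → Spec_find_closest_valid_rank in_features out_features target_rank (find_closest_valid_rank in_features out_features target_rank)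

-- ===== LEMMAS AND PROOFS =====

-- the per-iteration contribution of the shared sqrt-loop body
def pvF (n : Int) (i : Int) : List Int :=
  if PySem.Int.mod n i = 0 then
    (if i ≠ PySem.Int.floordiv n i then [i, PySem.Int.floordiv n i] else [i])
  else []

-- the unsorted divisor list both loops produce
def pvS (n : Int) : List Int := (PySem.List.pyRange 1 (pvSqrtI n + 1) 1).flatMap (pvF n)

theorem pvSqrtI_nonneg (n : Int) : 0 ≤ pvSqrtI n := by
  simp [pvSqrtI]

theorem pvSqrtI_le (n : Int) (hn : 0 ≤ n) : pvSqrtI n ≤ n := by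
  have := Nat.sqrt_le_self n.toNat
  simp only [pvSqrtI]
  omega

theorem pvSq_sqrtI_le (n : Int) (hn : 0 ≤ n) : pvSqrtI n * pvSqrtI n ≤ n := by
  have h := Nat.sqrt_le' n.toNat
  simp only [pow_two] at h
  have : ((Nat.sqrt n.toNat * Nat.sqrt n.toNat : Nat) : Int) ≤ ((n.toNat : Nat) : Int) := by
    exact_mod_cast h
  simp only [pvSqrtI]
  push_cast at this ⊢
  omega

theorem pvLt_succ_sqrtI (n : Int) (hn : 0 ≤ n) : n < (pvSqrtI n + 1) * (pvSqrtI n + 1) := by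
  have h := Nat.lt_succ_sqrt' n.toNat
  simp only [pow_two] at h
  have : ((n.toNat : Nat) : Int) < ((Nat.sqrt n.toNat).succ * (Nat.sqrt n.toNat).succ : Nat) := by
    exact_mod_cast h
  simp only [pvSqrtI]
  push_cast at this ⊢
  omega

theorem pvLe_sqrtI_iff (n i : Int) (hn : 0 ≤ n) (hi : 0 ≤ i) : i ≤ pvSqrtI n ↔ i * i ≤ n := by
  constructor
  · intro h
    calc i * i ≤ pvSqrtI n * pvSqrtI n := by
          exact mul_le_mul h h hi (pvSqrtI_nonneg n)
      _ ≤ n := pvSq_sqrtI_le n hn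
  · intro h
    by_contra hc
    have h1 : pvSqrtI n + 1 ≤ i := by omega
    have h2 : (pvSqrtI n + 1) * (pvSqrtI n + 1) ≤ i * i := by
      exact mul_le_mul h1 h1 (by have := pvSqrtI_nonneg n; omega) (by omega)
    have := pvLt_succ_sqrtI n hn
    omega

-- A's foldl loop is the flatMap of pvF over the range
theorem pvFoldl_eq_flatMap (n : Int) (l : List Int) (acc : List Int) :
    l.foldl (fun factors i =>
      if PySem.Int.mod n i = 0 then
        let factors' := factors ++ [i]
        if i ≠ PySem.Int.floordiv n i then factors' ++ [PySem.Int.floordiv n i] else factors'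
      else factors) acc = acc ++ l.flatMap (pvF n) := by
  have hcongr : l.foldl (fun factors i =>
      if PySem.Int.mod n i = 0 then
        let factors' := factors ++ [i]
        if i ≠ PySem.Int.floordiv n i then factors' ++ [PySem.Int.floordiv n i] else factors'
      else factors) acc = l.foldl (fun factors i => factors ++ pvF n i) acc := by
    apply PySem.List.foldl_congr_mem
    intro a x _
    simp only [pvF]
    split_ifs <;> simp
  rw [hcongr, PySem.List.foldl_append_eq_flatMap]

-- membership of pvF
theorem pvMem_f (n i x : Int) : x ∈ pvF n i ↔ i ∣ n ∧ (x = i ∨ x = PySem.Int.floordiv n i) := by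
  simp only [pvF]
  rw [← PySem.Int.mod_eq_zero_iff_dvd n i]
  split_ifs with h1 h2
  · simp [h1]
  · have h3 : i = PySem.Int.floordiv n i := not_not.mp h2
    simp [h1, ← h3]
  · simp only [List.not_mem_nil, false_iff]
    tauto

-- membership of the shared divisor list: exactly the positive divisors of n
theorem pvMem_S (n x : Int) (hn : 1 ≤ n) : x ∈ pvS n ↔ 1 ≤ x ∧ x ∣ n := by
  simp only [pvS, List.mem_flatMap]
  constructor
  · rintro ⟨i, hir, hx⟩
    rw [PySem.List.mem_pyRange_one] at hir
    obtain ⟨hi1, hi2⟩ := hir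
    rw [pvMem_f] at hx
    obtain ⟨hdvd, hx⟩ := hx
    have hipos : 0 < i := hi1
    have hin : i ≤ n := le_trans (by omega : i ≤ pvSqrtI n) (pvSqrtI_le n (by omega))
    rcases hx with rfl | rfl
    · exact ⟨hi1, hdvd⟩
    · rw [PySem.Int.floordiv_eq_ediv_of_pos hipos]
      refine ⟨?_, ⟨i, (Int.ediv_mul_cancel hdvd).symm⟩⟩
      rw [Int.le_ediv_iff_mul_le hipos]
      omega
  · rintro ⟨hx1, hdvd⟩
    have hxn : x ≤ n := Int.le_of_dvd (by omega) hdvd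
    have hxpos : 0 < x := hx1
    by_cases hxs : x ≤ pvSqrtI n
    · exact ⟨x, by rw [PySem.List.mem_pyRange_one]; omega,
        by rw [pvMem_f]; exact ⟨hdvd, Or.inl rfl⟩⟩
    · have hq1 : 1 ≤ n / x := by rw [Int.le_ediv_iff_mul_le hxpos]; omega
      have hnq : n = x * (n / x) := (Int.mul_ediv_cancel' hdvd).symm
      have hqd : (n / x) ∣ n := ⟨x, by rw [mul_comm]; exact hnq⟩
      have hqs : n / x ≤ pvSqrtI n := by
        have hs0 := pvSqrtI_nonneg n
        have h1 : n / x < pvSqrtI n + 1 := by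
          rw [Int.ediv_lt_iff_lt_mul hxpos]
          calc n < (pvSqrtI n + 1) * (pvSqrtI n + 1) := pvLt_succ_sqrtI n (by omega)
            _ ≤ (pvSqrtI n + 1) * x := by
                exact mul_le_mul_of_nonneg_left (by omega) (by omega)
        omega
      refine ⟨n / x, by rw [PySem.List.mem_pyRange_one]; omega, ?_⟩
      rw [pvMem_f]
      refine ⟨hqd, Or.inr ?_⟩
      rw [PySem.Int.floordiv_eq_ediv_of_pos (by omega : (0:Int) < n / x)]
      conv_lhs => rw [show x = x * (n / x) / (n / x) from (Int.mul_ediv_cancel x (by omega)).symm]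
      rw [← hnq]

-- the shared divisor list has no duplicates
theorem pvNodup_S (n : Int) (hn : 1 ≤ n) : (pvS n).Nodup := by
  rw [pvS, List.nodup_flatMap]
  constructor
  · intro i _
    simp only [pvF]
    split_ifs with h1 h2
    · simp [List.nodup_cons]
      exact h2
    · simp
    · simp
  · rw [List.pairwise_iff_getElem]
    intro p q hp hq hpq
    have hlen := PySem.List.length_pyRange_one 1 (pvSqrtI n + 1)
    rw [PySem.List.getElem_pyRange_one, PySem.List.getElem_pyRange_one]
    have hs0 := pvSqrtI_nonneg n
    set i : Int := 1 + (p : Int) with hidef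
    set j : Int := 1 + (q : Int) with hjdef
    have hi1 : 1 ≤ i := by omega
    have hij : i < j := by omega
    have hjs : j ≤ pvSqrtI n := by
      rw [hlen] at hq
      omega
    have hipos : 0 < i := by omega
    have hjpos : 0 < j := by omega
    intro x hxi hxj
    rw [pvMem_f] at hxi hxj
    obtain ⟨hdi, hxi⟩ := hxi
    obtain ⟨hdj, hxj⟩ := hxj
    rw [PySem.Int.floordiv_eq_ediv_of_pos hipos] at hxi
    rw [PySem.Int.floordiv_eq_ediv_of_pos hjpos] at hxj
    have hjj : j * j ≤ n := by
      rw [← pvLe_sqrtI_iff n j (by omega) (by omega)]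
      exact hjs
    have hjle : j ≤ n / j := by rw [Int.le_ediv_iff_mul_le hjpos]; exact hjj
    rcases hxi with rfl | rfl <;> rcases hxj with h | h
    · omega
    · omega
    · -- n / i = j : then n = j * i, so n / j = i, contradicting j ≤ n / j and i < j
      have hni : n = (n / i) * i := (Int.ediv_mul_cancel hdi).symm
      rw [h] at hni
      have : n / j = i := by rw [hni, Int.mul_ediv_cancel_left i (by omega)]
      omega
    · -- n / i = n / j : then (n/j) * i = (n/j) * j, so i = j
      have hni : n = (n / i) * i := (Int.ediv_mul_cancel hdi).symm
      have hnj : n = (n / j) * j := (Int.ediv_mul_cancel hdj).symm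
      rw [h] at hni
      have hq0 : n / j ≠ 0 := by omega
      have : i = j := by
        have := hni.symm.trans hnj
        exact mul_left_cancel₀ (a := n / j) hq0 (by rw [mul_comm (n/j) i, mul_comm (n/j) j] at *; omega)
      omega

-- B's loop produces the tail of the shared divisor list
theorem pvDivLoop_eq (g : Int) (hg : 0 ≤ g) : ∀ (k : Nat) (i : Int) (acc : List Int), 1 ≤ i →
    (g + 1 - i).toNat = k →
    pvDivLoop g i acc = acc ++ (PySem.List.pyRange i (pvSqrtI g + 1) 1).flatMap (pvF g) := by
  intro k
  induction k using Nat.strong_induction_on with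
  | _ k IH =>
    intro i acc hi hk
    rw [pvDivLoop]
    by_cases h : i * i ≤ g
    · rw [dif_pos h]
      have hile : i ≤ pvSqrtI g := by
        rw [pvLe_sqrtI_iff g i hg (by omega)]
        exact h
      have hstep : (if PySem.Int.mod g i = 0 then
            let divisors := acc ++ [i]
            if i ≠ PySem.Int.floordiv g i then divisors ++ [PySem.Int.floordiv g i] else divisors
          else acc) = acc ++ pvF g i := by
        simp only [pvF]
        split_ifs <;> simp
      rw [hstep]
      rw [IH ((g + 1 - (i + 1)).toNat) (by have := pvLeOfSqLe i g h; omega) (i + 1)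
        (acc ++ pvF g i) (by omega) rfl]
      rw [PySem.List.pyRange_one_cons (by omega : i < pvSqrtI g + 1), List.flatMap_cons,
        List.append_assoc]
    · rw [dif_neg h]
      have hlt : pvSqrtI g < i := by
        by_contra hc
        exact h ((pvLe_sqrtI_iff g i hg (by omega)).mp (by omega))
      rw [PySem.List.pyRange_one_eq_nil (by omega)]
      simp

-- B's gcd loop is Int.gcd on nonnegative arguments
theorem pvGcdLoop_eq : ∀ (k : Nat) (a b : Int), 0 ≤ a → 0 ≤ b → b.natAbs = k →
    pvGcdLoop a b = (Int.gcd a b : Int) := by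
  intro k
  induction k using Nat.strong_induction_on with
  | _ k IH =>
    intro a b ha hb hk
    rw [pvGcdLoop]
    split_ifs with h
    · subst h
      rw [Int.gcd_zero_right, Int.natAbs_of_nonneg ha]
    · have hbpos : 0 < b := by omega
      have hmod : PySem.Int.mod a b = a % b := PySem.Int.mod_eq_emod_of_pos hbpos
      have hm0 : 0 ≤ a % b := Int.emod_nonneg a (by omega)
      have hmlt : a % b < b := Int.emod_lt_of_pos a hbpos
      rw [hmod, IH (a % b).natAbs (by omega) b (a % b) (by omega) hm0 rfl]
      obtain ⟨A, rfl⟩ := Int.eq_ofNat_of_zero_le ha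
      obtain ⟨B, rfl⟩ := Int.eq_ofNat_of_zero_le (by omega : (0:Int) ≤ b)
      have hcast : ((A:Int) % (B:Int)) = ((A % B : Nat) : Int) := by push_cast; ring
      rw [hcast]
      simp only [Int.gcd, Int.natAbs_natCast]
      rw [Nat.gcd_comm B (A % B), ← Nat.gcd_rec, Nat.gcd_comm B A]

-- A's helper produces the sorted shared divisor list
theorem pvGetFactors_eq (n : Int) : pvGetFactors n = PySem.List.sorted (pvS n) (fun x => x) false := by
  simp only [pvGetFactors]
  rw [pvFoldl_eq_flatMap]
  rfl

theorem find_closest_valid_rank_spec : Claim_equal_find_closest_valid_rank := by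
  intro i o t _ hpre
  obtain ⟨hi, ho⟩ := hpre
  unfold Spec_find_closest_valid_rank
  have hg : pvGcdLoop i o = (Int.gcd i o : Int) :=
    pvGcdLoop_eq o.natAbs i o (by omega) (by omega) rfl
  have hgpos : 1 ≤ (Int.gcd i o : Int) := by
    have : 0 < Int.gcd i o := Int.gcd_pos_iff.mpr (Or.inl (by omega))
    exact_mod_cast this
  have hB : pvDivLoop (pvGcdLoop i o) 1 [] = pvS (Int.gcd i o) := by
    rw [hg, pvDivLoop_eq (Int.gcd i o) (by omega) (Int.gcd i o : Int).toNat 1 [] (by omega) (by omega)]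
    rfl
  have hndA : (PySem.Set.inter (PySem.Set.ofList (pvGetFactors i)) (PySem.Set.ofList (pvGetFactors o))).Nodup :=
    PySem.Set.nodup_inter _ _ (PySem.Set.nodup_ofList _)
  have hmem : ∀ x : Int,
      x ∈ PySem.Set.inter (PySem.Set.ofList (pvGetFactors i)) (PySem.Set.ofList (pvGetFactors o)) ↔
      x ∈ pvS (Int.gcd i o) := by
    intro x
    rw [PySem.Set.mem_inter, PySem.Set.mem_ofList, PySem.Set.mem_ofList,
      pvGetFactors_eq, pvGetFactors_eq, PySem.List.mem_sorted, PySem.List.mem_sorted,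
      pvMem_S i x hi, pvMem_S o x ho, pvMem_S (Int.gcd i o) x hgpos]
    constructor
    · rintro ⟨⟨hx1, hdi⟩, ⟨_, hdo⟩⟩
      refine ⟨hx1, ?_⟩
      rcases Int.eq_ofNat_of_zero_le (by omega : (0:Int) ≤ x) with ⟨X, rfl⟩
      exact_mod_cast Int.dvd_gcd hdi hdo
    · rintro ⟨hx1, hdg⟩
      exact ⟨⟨hx1, hdg.trans (Int.gcd_dvd_left i o)⟩, ⟨hx1, hdg.trans (Int.gcd_dvd_right i o)⟩⟩
  have hperm : (PySem.Set.inter (PySem.Set.ofList (pvGetFactors i)) (PySem.Set.ofList (pvGetFactors o))).Perm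
      (pvS (Int.gcd i o)) :=
    (List.perm_ext_iff_of_nodup hndA (pvNodup_S (Int.gcd i o) hgpos)).mpr hmem
  have hlists : PySem.List.sorted
      (PySem.Set.inter (PySem.Set.ofList (pvGetFactors i)) (PySem.Set.ofList (pvGetFactors o))) (fun x => x) false
      = PySem.List.sorted (pvDivLoop (pvGcdLoop i o) 1 []) (fun x => x) false := by
    rw [hB]
    exact PySem.List.sorted_eq_sorted_of_perm _ _ _ (fun a b h => h) hperm
  simp only [find_closest_valid_rank, find_closest_valid_rank_alt]
  rw [if_neg (by omega), hlists]
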